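-- pv_equiv track=rewrite | github.com/qi3-at-j/dpvs | fw_tools/apr_generate/to_suricata/basic_tools.py | transf_hex_pattern
-- ===== SOURCE A (Python) =====
-- def transf_hex_pattern(orig_pattern):
--     if len(orig_pattern) == 0:
--         return ''
--     trans_str = ''
--     fir_s = orig_pattern[0]
--     oib = ord(fir_s)
--     visable = 1
--     if oib <= 31 or oib >= 127:
--         visable = 0
--         trans_str += '|'
--     for each_ch in orig_pattern:
--         oib = ord(each_ch)
--         if oib <= 31 or oib >= 127 or each_ch == '"' or each_ch == ':' or each_ch == '|' or each_ch == ';' or each_ch == '\\':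
--             if visable == 1:
--                 trans_str += '|{:02X} '.format(oib)
--             else:
--                 trans_str += '{:02X} '.format(oib)
--             visable = 0
--         else:
--             if visable == 1:
--                 trans_str += chr(oib)
--             else:
--                 trans_str += ('|' + chr(oib))
--             visable = 1
--     if oib <= 31 or oib >= 127 or each_ch == '"' or each_ch == ':' or each_ch == '|' or each_ch == ';' or each_ch == '\\':
--         trans_str += '|'
--     return trans_str
-- ===== SOURCE B (Python) =====
-- def transf_hex_pattern(orig_pattern):
--     def needs_hex(c):
--         return ord(c) <= 31 or ord(c) >= 127 or c in '":|;\\'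
--     pieces = []
--     i = 0
--     n = len(orig_pattern)
--     while i < n:
--         h = needs_hex(orig_pattern[i])
--         j = i + 1
--         while j < n and needs_hex(orig_pattern[j]) == h:
--             j += 1
--         run = orig_pattern[i:j]
--         if h:
--             pieces.append('|' + ''.join('{:02X} '.format(ord(c)) for c in run) + '|')
--         else:
--             pieces.append(run)
--         i = j
--     return ''.join(pieces)
-- ===== Notes on version B (the rewrite author's own statement) =====
-- stated objective: simpler
-- what changed: B splits the string into maximal runs of hex-escaped vs visible characters and renders each run as a whole ('|XX YY |' or the run itself), eliminating A's visable state flag, the first-character prepend and the trailing-pipe patch.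
import Mathlib
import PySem

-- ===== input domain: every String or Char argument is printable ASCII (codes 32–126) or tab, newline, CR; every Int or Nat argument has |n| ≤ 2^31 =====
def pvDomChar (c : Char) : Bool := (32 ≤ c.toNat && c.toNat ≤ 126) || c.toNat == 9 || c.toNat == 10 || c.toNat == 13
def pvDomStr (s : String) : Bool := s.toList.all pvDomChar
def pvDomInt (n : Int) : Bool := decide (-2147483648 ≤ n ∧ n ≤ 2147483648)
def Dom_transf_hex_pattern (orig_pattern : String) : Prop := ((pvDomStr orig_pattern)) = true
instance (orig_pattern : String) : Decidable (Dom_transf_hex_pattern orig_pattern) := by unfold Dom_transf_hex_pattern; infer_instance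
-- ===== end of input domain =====

-- B replaces A's visable-flag loop (plus first-char prepend and trailing patch) by
-- splitting the string into maximal runs and rendering each run whole (objective: simpler).

-- ===== PORT A =====

-- '{:02X} '.format(n): exact for n ≤ 255 (all chars in Dom_)
def pvHexDigit (n : Nat) : Char := if n < 10 then Char.ofNat (48 + n) else Char.ofNat (55 + n)
def pvHex2 (n : Nat) : List Char := [pvHexDigit (n / 16), pvHexDigit (n % 16), ' ']

-- the repeated escape condition of A (on oib = ord(each_ch) and each_ch)
def pvCondA (oib : Nat) (ch : Char) : Bool :=
  oib ≤ 31 || oib ≥ 127 || ch == '"' || ch == ':' || ch == '|' || ch == ';' || ch == '\\'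

-- A's for-loop, carrying (trans_str, visable, oib, each_ch)
def pvLoopA : List Char → Nat → Nat → Char → List Char → List Char × Nat × Nat × Char
  | acc, vis, oib, ch, [] => (acc, vis, oib, ch)
  | acc, vis, _, _, c :: cs =>
      let o := c.toNat
      if pvCondA o c then
        pvLoopA (acc ++ (if vis == 1 then '|' :: pvHex2 o else pvHex2 o)) 0 o c cs
      else
        pvLoopA (acc ++ (if vis == 1 then [c] else ['|', c])) 1 o c cs

-- the final 'if … : trans_str += "|"' of A
def pvFinishA : List Char × Nat × Nat × Char → List Char
  | (acc, _, oib, ch) => if pvCondA oib ch then acc ++ ['|'] else acc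

def transf_hex_pattern (orig_pattern : String) : String :=
  match orig_pattern.toList with
  | [] => ""
  | fir :: rest =>
    let oib := fir.toNat
    let (trans0, vis0) := if oib ≤ 31 || oib ≥ 127 then (['|'], 0) else (([] : List Char), 1)
    String.mk (pvFinishA (pvLoopA trans0 vis0 oib fir (fir :: rest)))

-- ===== PORT B =====

def pvNeedsHex (c : Char) : Bool :=
  c.toNat ≤ 31 || c.toNat ≥ 127 || c == '"' || c == ':' || c == '|' || c == ';' || c == '\\'

-- Source B's outer while: split into maximal runs of equal class.  The inner while starts at
-- j = i + 1, so the run is the head char followed by the takeWhile of the tail.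
def pvSplitRuns : List Char → List (Bool × List Char)
  | [] => []
  | c :: cs =>
    let h := pvNeedsHex c
    (h, c :: cs.takeWhile (fun x => pvNeedsHex x == h)) ::
      pvSplitRuns (cs.dropWhile (fun x => pvNeedsHex x == h))
termination_by cs => cs.length
decreasing_by
  exact Nat.lt_succ_of_le (List.length_dropWhile_le _ _)

-- render one run: '|' + ''.join('{:02X} '…) + '|' for a hex run, the run itself otherwise
def pvRenderRun (hr : Bool × List Char) : List Char :=
  if hr.1 then '|' :: (hr.2.flatMap (fun c => pvHex2 c.toNat) ++ ['|']) else hr.2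

def transf_hex_pattern_alt (orig_pattern : String) : String :=
  String.mk ((pvSplitRuns orig_pattern.toList).flatMap pvRenderRun)

-- ===== PRECONDITION & SPEC =====
def Spec_transf_hex_pattern (orig_pattern : String) (out : String) : Prop := out = transf_hex_pattern_alt orig_pattern
instance (orig_pattern : String) (out : String) : Decidable (Spec_transf_hex_pattern orig_pattern out) := by unfold Spec_transf_hex_pattern; infer_instance

-- ===== CLAIM (what is proved, stated in full; the proofs are below) =====
def Claim_equal_transf_hex_pattern : Prop := ∀ (orig_pattern : String), Dom_transf_hex_pattern orig_pattern → Spec_transf_hex_pattern orig_pattern (transf_hex_pattern orig_pattern)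

-- ===== LEMMAS AND PROOFS =====

-- canonical state-machine form both ports are reduced to; prev = "previous char was escaped"
def pvGo : Bool → List Char → List Char
  | prev, [] => if prev then ['|'] else []
  | prev, c :: cs =>
    if pvNeedsHex c then
      (if prev then pvHex2 c.toNat else '|' :: pvHex2 c.toNat) ++ pvGo true cs
    else
      (if prev then ['|', c] else [c]) ++ pvGo false cs

theorem pvCondA_eq (c : Char) : pvCondA c.toNat c = pvNeedsHex c := rfl

theorem loopA_go (cs : List Char) : ∀ (c : Char) (acc : List Char) (vis oib : Nat) (ch : Char),
    pvFinishA (pvLoopA acc vis oib ch (c :: cs)) = acc ++ pvGo (!(vis == 1)) (c :: cs) := by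
  induction cs with
  | nil =>
    intro c acc vis oib ch
    simp only [pvLoopA, pvGo, pvFinishA]
    by_cases h : pvNeedsHex c = true <;> by_cases hv : vis = 1 <;>
      simp [h, hv, pvCondA_eq, pvLoopA, pvFinishA]
  | cons d ds ih =>
    intro c acc vis oib ch
    have step : pvLoopA acc vis oib ch (c :: d :: ds) =
        if pvCondA c.toNat c then
          pvLoopA (acc ++ (if vis == 1 then '|' :: pvHex2 c.toNat else pvHex2 c.toNat)) 0 c.toNat c (d :: ds)
        else
          pvLoopA (acc ++ (if vis == 1 then [c] else ['|', c])) 1 c.toNat c (d :: ds) := rfl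
    rw [step, pvCondA_eq]
    by_cases h : pvNeedsHex c = true <;> by_cases hv : vis = 1 <;>
      (simp only [h, hv, if_true, if_false, beq_iff_eq, beq_self_eq_true, if_pos, if_neg,
        Bool.not_eq_true, reduceIte] <;> try simp [hv]) <;>
      rw [ih] <;> simp [pvGo, h, hv, List.append_assoc]

theorem go_hex_run (ds : List Char) (rest : List Char)
    (h : ∀ x ∈ ds, pvNeedsHex x = true) :
    pvGo true (ds ++ rest) = ds.flatMap (fun c => pvHex2 c.toNat) ++ pvGo true rest := by
  induction ds with
  | nil => simp
  | cons d t ih =>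
    have hd : pvNeedsHex d = true := h d (by simp)
    simp only [List.cons_append, pvGo, hd, if_pos, List.flatMap_cons]
    rw [ih (fun x hx => h x (by simp [hx]))]
    simp

theorem go_vis_run (ds : List Char) (rest : List Char)
    (h : ∀ x ∈ ds, pvNeedsHex x = false) :
    pvGo false (ds ++ rest) = ds ++ pvGo false rest := by
  induction ds with
  | nil => simp
  | cons d t ih =>
    have hd : pvNeedsHex d = false := h d (by simp)
    simp only [List.cons_append, pvGo, hd]
    rw [ih (fun x hx => h x (by simp [hx]))]
    simp

theorem go_true_pipe (rest : List Char)
    (h : ∀ r ∈ rest.head?, pvNeedsHex r = false) :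
    pvGo true rest = '|' :: pvGo false rest := by
  cases rest with
  | nil => simp [pvGo]
  | cons r rs =>
    have hr : pvNeedsHex r = false := h r (by simp)
    simp [pvGo, hr]

theorem head?_dropWhile_false (p : Char → Bool) (l : List Char) :
    ∀ r ∈ (l.dropWhile p).head?, p r = false := by
  induction l with
  | nil => simp
  | cons a t ih =>
    cases hp : p a
    · simp [List.dropWhile, hp]
    · simpa [List.dropWhile, hp] using ih

theorem splitRuns_go_aux (n : Nat) : ∀ cs : List Char, cs.length ≤ n →
    (pvSplitRuns cs).flatMap pvRenderRun = pvGo false cs := by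
  induction n with
  | zero =>
    intro cs hl
    have : cs = [] := List.eq_nil_of_length_eq_zero (Nat.le_zero.mp hl)
    subst this
    simp [pvSplitRuns, pvGo]
  | succ n ih =>
    intro cs hl
    cases cs with
    | nil => simp [pvSplitRuns, pvGo]
    | cons c t =>
      cases hh : pvNeedsHex c with
      | true =>
        have htw : ∀ x ∈ t.takeWhile (fun x => pvNeedsHex x == true), pvNeedsHex x = true := by
          intro x hx; simpa using List.mem_takeWhile_imp hx
        have hhd : ∀ r ∈ (t.dropWhile (fun x => pvNeedsHex x == true)).head?,
            pvNeedsHex r = false := by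
          intro r hr
          simpa using head?_dropWhile_false (fun x => pvNeedsHex x == true) t r hr
        have hrec := ih (t.dropWhile (fun x => pvNeedsHex x == true))
          (le_trans (List.length_dropWhile_le _ _) (Nat.succ_le_succ_iff.mp hl))
        have ht : t = t.takeWhile (fun x => pvNeedsHex x == true) ++
            t.dropWhile (fun x => pvNeedsHex x == true) :=
          (List.takeWhile_append_dropWhile).symm
        simp only [pvSplitRuns, hh]
        conv_rhs => rw [pvGo, hh, ht]
        rw [go_hex_run _ _ htw, go_true_pipe _ hhd]
        simp [pvRenderRun]
        simpa using hrec
      | false =>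
        have htw : ∀ x ∈ t.takeWhile (fun x => pvNeedsHex x == false), pvNeedsHex x = false := by
          intro x hx; simpa using List.mem_takeWhile_imp hx
        have hrec := ih (t.dropWhile (fun x => pvNeedsHex x == false))
          (le_trans (List.length_dropWhile_le _ _) (Nat.succ_le_succ_iff.mp hl))
        have ht : t = t.takeWhile (fun x => pvNeedsHex x == false) ++
            t.dropWhile (fun x => pvNeedsHex x == false) :=
          (List.takeWhile_append_dropWhile).symm
        simp only [pvSplitRuns, hh]
        conv_rhs => rw [pvGo, hh, ht]
        rw [go_vis_run _ _ htw]
        simp [pvRenderRun, hh]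
        simpa using hrec

theorem splitRuns_go (cs : List Char) :
    (pvSplitRuns cs).flatMap pvRenderRun = pvGo false cs :=
  splitRuns_go_aux cs.length cs (le_refl _)

theorem ports_agree (s : String) : transf_hex_pattern s = transf_hex_pattern_alt s := by
  unfold transf_hex_pattern transf_hex_pattern_alt
  cases hs : s.toList with
  | nil =>
    simp only [pvSplitRuns, List.flatMap_nil]
    decide
  | cons fir rest =>
    dsimp only
    rw [splitRuns_go]
    by_cases h : (decide (fir.toNat ≤ 31) || decide (fir.toNat ≥ 127)) = true
    · have hfir : pvNeedsHex fir = true := by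
        simp only [pvNeedsHex]
        rcases Bool.or_eq_true_iff.mp h with h' | h' <;> simp_all
      simp only [h, if_pos]
      rw [loopA_go]
      have h1 : pvGo (!((0:Nat) == 1)) (fir :: rest) = pvHex2 fir.toNat ++ pvGo true rest := by
        simp [pvGo, hfir]
      have h2 : pvGo false (fir :: rest) = '|' :: (pvHex2 fir.toNat ++ pvGo true rest) := by
        simp [pvGo, hfir]
      rw [h1, h2]
      rfl
    · simp only [h, if_neg, Bool.false_eq_true, not_false_iff]
      rw [loopA_go]
      simp

-- ===== VERDICT (by name: the statement is the Claim_ definition above) =====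
theorem transf_hex_pattern_spec : Claim_equal_transf_hex_pattern := by
  intro s _
  unfold Spec_transf_hex_pattern
  exact ports_agree s
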